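-- pv_equiv track=rewrite | github.com/skkuaws0229-prog/colon_drug_repurposing | 20260413_feature_reconstruction/mechanism/build_mechanism_v3_20260413.py | bfs_limited
-- ===== SOURCE A (Python) =====
-- from collections import defaultdict, deque
--
-- def bfs_limited(adj, start, max_hops):
--     """BFS from start node, limited to max_hops.
--     Returns dict {node: shortest_distance} for all reachable nodes."""
--     distances = {start: 0}
--     queue = deque([(start, 0)])
--     while queue:
--         node, dist = queue.popleft()
--         if dist >= max_hops:
--             continue
--         for neighbor in adj.get(node, {}):
--             if neighbor not in distances:
--                 distances[neighbor] = dist + 1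
--                 queue.append((neighbor, dist + 1))
--     return distances
-- ===== SOURCE B (Python) =====
-- def bfs_limited(adj, start, max_hops):
--     """Level-synchronized BFS from start, limited to max_hops.
--     Returns dict {node: shortest_distance} for all reachable nodes."""
--     distances = {start: 0}
--     frontier = [start]
--     d = 0
--     while frontier and d < max_hops:
--         next_frontier = []
--         for node in frontier:
--             for neighbor in adj.get(node, []):
--                 if neighbor not in distances:
--                     distances[neighbor] = d + 1
--                     next_frontier.append(neighbor)
--         frontier = next_frontier
--         d += 1
--     return distances
-- ===== Notes on version B (the rewrite author's own statement) =====
-- stated objective: alternative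
-- what changed: Replaced A's single deque of (node, dist) pairs with a level-synchronized BFS: an outer loop over hop counts that expands one explicit frontier list per level, so no distance tags travel through a queue and no dist >= max_hops guard is needed.
import Mathlib
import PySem

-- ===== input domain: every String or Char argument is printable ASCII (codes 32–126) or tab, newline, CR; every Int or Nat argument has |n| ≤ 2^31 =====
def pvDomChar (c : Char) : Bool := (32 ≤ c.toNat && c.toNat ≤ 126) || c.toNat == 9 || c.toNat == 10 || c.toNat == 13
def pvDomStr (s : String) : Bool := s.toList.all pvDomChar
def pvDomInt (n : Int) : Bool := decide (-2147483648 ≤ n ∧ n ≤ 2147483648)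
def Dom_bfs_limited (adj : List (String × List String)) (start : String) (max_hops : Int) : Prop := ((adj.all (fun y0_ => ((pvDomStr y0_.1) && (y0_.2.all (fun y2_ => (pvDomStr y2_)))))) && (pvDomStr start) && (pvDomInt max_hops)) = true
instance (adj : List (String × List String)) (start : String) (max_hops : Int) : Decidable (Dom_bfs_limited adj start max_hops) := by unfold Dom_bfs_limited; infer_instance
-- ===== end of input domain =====

-- B replaces A's single (node, dist) deque with a level-synchronized BFS (outer hop loop over an
-- explicit per-level frontier); same return value, objective: alternative decomposition.

-- ===== PORT A =====
-- body of A's inner 'for neighbor in adj.get(node, {})' loop: state = (distances, queue-tail)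
def bfsA_step (dist : Int) (s : PySem.Dict String Int × List (String × Int)) (nb : String) :
    PySem.Dict String Int × List (String × Int) :=
  if s.1.contains nb then s else (s.1.insert nb (dist + 1), s.2 ++ [(nb, dist + 1)])

-- the three lemmas below are cited by bfsA_loop's decreasing_by (a termination aid only)
theorem bfsA_step_fold_acc (dist : Int) (nbs : List String) :
    ∀ (dists : PySem.Dict String Int) (q : List (String × Int)),
      nbs.foldl (bfsA_step dist) (dists, q)
        = ((nbs.foldl (bfsA_step dist) (dists, [])).1,
           q ++ (nbs.foldl (bfsA_step dist) (dists, [])).2) := by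
  induction nbs with
  | nil => intro dists q; simp
  | cons nb t ih =>
    intro dists q
    simp only [List.foldl_cons, bfsA_step]
    by_cases h : dists.contains nb = true
    · rw [if_pos h, if_pos h]; exact ih dists q
    · rw [if_neg h, if_neg h]
      rw [ih (dists.insert nb (dist + 1)) (q ++ [(nb, dist + 1)]),
          ih (dists.insert nb (dist + 1)) ([] ++ [(nb, dist + 1)])]
      simp

theorem bfsA_step_fold_nil (dist : Int) (nbs : List String) :
    ∀ (dists : PySem.Dict String Int),
      (nbs.foldl (bfsA_step dist) (dists, [])).2 = [] →
      (nbs.foldl (bfsA_step dist) (dists, [])).1 = dists := by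
  induction nbs with
  | nil => intro dists _; rfl
  | cons nb t ih =>
    intro dists h
    simp only [List.foldl_cons, bfsA_step] at h ⊢
    by_cases hc : dists.contains nb = true
    · rw [if_pos hc] at h ⊢; exact ih dists h
    · exfalso
      rw [if_neg hc, bfsA_step_fold_acc] at h
      simp at h

theorem bfsA_contains_mono (dist : Int) (nbs : List String) :
    ∀ (dists : PySem.Dict String Int) (u : String), dists.contains u = true →
      ((nbs.foldl (bfsA_step dist) (dists, [])).1).contains u = true := by
  induction nbs with
  | nil => intro dists u h; exact h
  | cons nb t ih =>
    intro dists u h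
    simp only [List.foldl_cons, bfsA_step]
    by_cases hc : dists.contains nb = true
    · rw [if_pos hc]; exact ih dists u h
    · rw [if_neg hc, bfsA_step_fold_acc]
      apply ih
      rw [PySem.Dict.contains_insert]; simp [h]

theorem bfsA_step_fold_mem (dist : Int) (nbs : List String) :
    ∀ (dists : PySem.Dict String Int) (p : String × Int),
      p ∈ (nbs.foldl (bfsA_step dist) (dists, [])).2 →
      p.1 ∈ nbs ∧ dists.contains p.1 = false ∧
        ((nbs.foldl (bfsA_step dist) (dists, [])).1).contains p.1 = true := by
  induction nbs with
  | nil => intro dists p h; simp at h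
  | cons nb t ih =>
    intro dists p hp
    simp only [List.foldl_cons, bfsA_step] at hp ⊢
    by_cases hc : dists.contains nb = true
    · rw [if_pos hc] at hp ⊢
      rcases ih dists p hp with ⟨h1, h2, h3⟩
      exact ⟨List.mem_cons_of_mem _ h1, h2, h3⟩
    · rw [if_neg hc] at hp ⊢
      rw [bfsA_step_fold_acc] at hp ⊢
      simp only [List.nil_append, List.cons_append, List.mem_cons] at hp
      rcases hp with hp | hp
      · have hp1 : p.1 = nb := by rw [hp]
        rw [hp1]
        refine ⟨List.mem_cons_self, by simpa using hc, ?_⟩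
        exact bfsA_contains_mono dist t (dists.insert nb (dist + 1)) nb
          (by simp [PySem.Dict.contains_insert_self])
      · rcases ih (dists.insert nb (dist + 1)) p hp with ⟨h1, h2, h3⟩
        refine ⟨List.mem_cons_of_mem _ h1, ?_, h3⟩
        by_contra hcc
        simp only [Bool.not_eq_false] at hcc
        have : (dists.insert nb (dist + 1)).contains p.1 = true := by
          rw [PySem.Dict.contains_insert]; simp [hcc]
        rw [this] at h2; exact absurd h2 (by simp)

-- all neighbour-list members come from adj's values (termination aid)
theorem mem_getD_mk (adj : List (String × List String)) (node x : String)
    (h : x ∈ (PySem.Dict.mk adj).getD node []) : x ∈ adj.flatMap Prod.snd := by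
  induction adj with
  | nil => simp [PySem.Dict.getD, PySem.Dict.get?] at h
  | cons p t ih =>
    rw [PySem.Dict.getD_eq_get?_getD] at h ih
    rcases p with ⟨k, vs⟩
    rw [PySem.Dict.get?_mk_cons] at h
    by_cases hk : (k == node) = true
    · rw [if_pos hk] at h
      simp only [Option.getD_some] at h
      simp [h]
    · rw [if_neg hk] at h
      simp only [List.flatMap_cons, List.mem_append]
      exact Or.inr (ih h)

theorem filter_length_lt {α : Type} (l : List α) (p q : α → Bool)
    (h : ∀ a, q a = true → p a = true) (x : α) (hx : x ∈ l)
    (hpx : p x = true) (hqx : q x = false) :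
    (l.filter q).length < (l.filter p).length := by
  induction l with
  | nil => simp at hx
  | cons a t ih =>
    have hle : (t.filter q).length ≤ (t.filter p).length := by
      rw [← List.countP_eq_length_filter, ← List.countP_eq_length_filter]
      exact List.countP_mono_left (fun a _ ha => h a ha)
    rcases List.mem_cons.mp hx with rfl | hxt
    · simp only [List.filter_cons, hpx, hqx, if_true]
      simpa using Nat.lt_succ_of_le hle
    · have hlt := ih hxt
      by_cases hqa : q a = true
      · simp [hqa, h a hqa, Nat.succ_lt_succ hlt]
      · simp only [List.filter_cons, Bool.not_eq_true] at *
        by_cases hpa : p a = true <;> simp [hqa, hpa] <;> omega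

-- A's while-loop: pop (node, dist); skip if dist >= max_hops; else push unseen neighbours
def bfsA_loop (adj : List (String × List String)) (max_hops : Int)
    (dists : PySem.Dict String Int) (queue : List (String × Int)) :
    PySem.Dict String Int :=
  match queue with
  | [] => dists
  | (node, dist) :: rest =>
    if dist ≥ max_hops then bfsA_loop adj max_hops dists rest
    else
      let s := ((PySem.Dict.mk adj).getD node []).foldl (bfsA_step dist) (dists, rest)
      bfsA_loop adj max_hops s.1 s.2
termination_by
  (((adj.flatMap Prod.snd).filter (fun u => !(dists.contains u))).length, queue.length)
decreasing_by
  · exact Prod.Lex.right _ (Nat.lt_succ_self _)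
  · rw [bfsA_step_fold_acc]
    rcases hnil : (((PySem.Dict.mk adj).getD node []).foldl (bfsA_step dist) (dists, [])).2 with _ | ⟨p, app⟩
    · rw [bfsA_step_fold_nil _ _ _ hnil]
      exact Prod.Lex.right _ (by simp)
    · apply Prod.Lex.left
      have hp : p ∈ (((PySem.Dict.mk adj).getD node []).foldl (bfsA_step dist) (dists, [])).2 := by
        rw [hnil]; exact List.mem_cons_self
      rcases bfsA_step_fold_mem dist _ dists p hp with ⟨h1, h2, h3⟩
      apply filter_length_lt _ _ _ ?mono p.1 (mem_getD_mk adj node p.1 h1)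
        (by simp [h2]) (by simp [h3])
      case mono =>
        intro a ha
        simp only [Bool.not_eq_true'] at ha ⊢
        by_contra hcc
        simp only [Bool.not_eq_false] at hcc
        rw [bfsA_contains_mono dist ((PySem.Dict.mk adj).getD node []) dists a hcc] at ha
        exact absurd ha (by simp)

def bfs_limited (adj : List (String × List String)) (start : String) (max_hops : Int) :
    List (String × Int) :=
  (bfsA_loop adj max_hops (PySem.Dict.mk [(start, 0)]) [(start, 0)]).items

-- ===== PORT B =====
-- body of B's inner 'for neighbor in adj.get(node, [])' loop: state = (distances, next_frontier)
def bfsB_step (d : Int) (s : PySem.Dict String Int × List String) (nb : String) :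
    PySem.Dict String Int × List String :=
  if s.1.contains nb then s else (s.1.insert nb (d + 1), s.2 ++ [nb])

-- one frontier node: scan its neighbour list
def bfsB_node (adj : List (String × List String)) (d : Int)
    (s : PySem.Dict String Int × List String) (node : String) :
    PySem.Dict String Int × List String :=
  ((PySem.Dict.mk adj).getD node []).foldl (bfsB_step d) s

-- B's outer 'while frontier and d < max_hops' loop over the per-level frontier
def bfsB_loop (adj : List (String × List String)) (max_hops : Int)
    (frontier : List String) (dists : PySem.Dict String Int) (d : Int) :
    PySem.Dict String Int :=
  if frontier.isEmpty = false ∧ d < max_hops then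
    let s := frontier.foldl (bfsB_node adj d) (dists, [])
    bfsB_loop adj max_hops s.2 s.1 (d + 1)
  else dists
termination_by (max_hops - d).toNat
decreasing_by omega

def bfs_limited_alt (adj : List (String × List String)) (start : String) (max_hops : Int) :
    List (String × Int) :=
  (bfsB_loop adj max_hops [start] (PySem.Dict.mk [(start, 0)]) 0).items

-- ===== PRECONDITION & SPEC =====
def Spec_bfs_limited (adj : List (String × List String)) (start : String) (max_hops : Int) (out : List (String × Int)) : Prop := out = bfs_limited_alt adj start max_hops
instance (adj : List (String × List String)) (start : String) (max_hops : Int) (out : List (String × Int)) : Decidable (Spec_bfs_limited adj start max_hops out) := by unfold Spec_bfs_limited; infer_instance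

-- ===== CLAIM (what is proved, stated in full; the proofs are below) =====
def Claim_equal_bfs_limited : Prop := ∀ (adj : List (String × List String)) (start : String) (max_hops : Int), Dom_bfs_limited adj start max_hops → Spec_bfs_limited adj start max_hops (bfs_limited adj start max_hops)

-- ===== LEMMAS AND PROOFS =====

-- A's inner loop is B's inner loop with each appended name paired with its distance
theorem inner_rel (d : Int) (nbs : List String) :
    ∀ (dists : PySem.Dict String Int) (q : List String),
      nbs.foldl (bfsA_step d) (dists, q.map (fun n => (n, d + 1)))
        = ((nbs.foldl (bfsB_step d) (dists, q)).1,
           (nbs.foldl (bfsB_step d) (dists, q)).2.map (fun n => (n, d + 1))) := by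
  induction nbs with
  | nil => intro dists q; simp
  | cons nb t ih =>
    intro dists q
    simp only [List.foldl_cons, bfsA_step, bfsB_step]
    by_cases h : dists.contains nb = true
    · rw [if_pos h, if_pos h]; exact ih dists q
    · rw [if_neg h, if_neg h]
      have hmap : q.map (fun n => (n, d + 1)) ++ [(nb, d + 1)]
          = (q ++ [nb]).map (fun n => (n, d + 1)) := by simp
      rw [hmap]; exact ih _ (q ++ [nb])

-- B's inner loop with an accumulator splits off the accumulator
theorem bfsB_step_fold_acc (d : Int) (nbs : List String) :
    ∀ (dists : PySem.Dict String Int) (q : List String),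
      nbs.foldl (bfsB_step d) (dists, q)
        = ((nbs.foldl (bfsB_step d) (dists, [])).1,
           q ++ (nbs.foldl (bfsB_step d) (dists, [])).2) := by
  induction nbs with
  | nil => intro dists q; simp
  | cons nb t ih =>
    intro dists q
    simp only [List.foldl_cons, bfsB_step]
    by_cases h : dists.contains nb = true
    · rw [if_pos h, if_pos h]; exact ih dists q
    · rw [if_neg h, if_neg h]
      rw [ih (dists.insert nb (d + 1)) (q ++ [nb]), ih (dists.insert nb (d + 1)) ([] ++ [nb])]
      simp

-- processing one whole level of A's queue = one iteration of B's hop loop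
theorem level_eq (adj : List (String × List String)) (max_hops d : Int) (hd : d < max_hops)
    (cur : List String) :
    ∀ (dists : PySem.Dict String Int) (acc : List String),
      bfsA_loop adj max_hops dists
        (cur.map (fun n => (n, d)) ++ acc.map (fun n => (n, d + 1)))
        = bfsA_loop adj max_hops (cur.foldl (bfsB_node adj d) (dists, acc)).1
            ((cur.foldl (bfsB_node adj d) (dists, acc)).2.map (fun n => (n, d + 1))) := by
  induction cur with
  | nil => intro dists acc; simp
  | cons node t ih =>
    intro dists acc
    rw [List.map_cons, List.cons_append, bfsA_loop]
    simp only [not_le.mpr hd]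
    have hres : ((PySem.Dict.mk adj).getD node []).foldl (bfsA_step d)
          (dists, t.map (fun n => (n, d)) ++ acc.map (fun n => (n, d + 1)))
        = let FB := ((PySem.Dict.mk adj).getD node []).foldl (bfsB_step d) (dists, [])
          (FB.1, t.map (fun n => (n, d)) ++ (acc ++ FB.2).map (fun n => (n, d + 1))) := by
      rw [bfsA_step_fold_acc]
      have h0 := inner_rel d ((PySem.Dict.mk adj).getD node []) dists []
      simp only [List.map_nil] at h0
      rw [h0]
      simp [List.append_assoc]
    rw [hres]
    have hih := ih ((((PySem.Dict.mk adj).getD node []).foldl (bfsB_step d) (dists, [])).1)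
      (acc ++ (((PySem.Dict.mk adj).getD node []).foldl (bfsB_step d) (dists, [])).2)
    rw [hih]
    have : t.foldl (bfsB_node adj d)
          ((((PySem.Dict.mk adj).getD node []).foldl (bfsB_step d) (dists, [])).1,
           acc ++ (((PySem.Dict.mk adj).getD node []).foldl (bfsB_step d) (dists, [])).2)
        = (node :: t).foldl (bfsB_node adj d) (dists, acc) := by
      rw [List.foldl_cons]
      unfold bfsB_node
      rw [bfsB_step_fold_acc d _ dists acc]
    rw [this]
    simp

-- once dist has reached max_hops every queue entry is popped and skipped
theorem skip_eq (adj : List (String × List String)) (max_hops d : Int) (hd : max_hops ≤ d)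
    (l : List String) : ∀ (dists : PySem.Dict String Int),
    bfsA_loop adj max_hops dists (l.map (fun n => (n, d))) = dists := by
  induction l with
  | nil => intro dists; rw [bfsA_loop.eq_def]; rfl
  | cons n t ih =>
    intro dists
    rw [List.map_cons, bfsA_loop]
    simp only [ge_iff_le, hd, if_true]
    exact ih dists

-- main induction over the remaining hop budget
theorem main_eq (adj : List (String × List String)) (max_hops : Int) :
    ∀ (n : Nat) (d : Int), (max_hops - d).toNat = n →
      ∀ (frontier : List String) (dists : PySem.Dict String Int),
        bfsA_loop adj max_hops dists (frontier.map (fun x => (x, d)))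
          = bfsB_loop adj max_hops frontier dists d := by
  intro n
  induction n with
  | zero =>
    intro d hd frontier dists
    have hle : max_hops ≤ d := by omega
    rw [skip_eq adj max_hops d hle, bfsB_loop]
    rw [if_neg (by omega : ¬(frontier.isEmpty = false ∧ d < max_hops))]
  | succ m ih =>
    intro d hd frontier dists
    have hlt : d < max_hops := by omega
    rw [bfsB_loop]
    rcases frontier with _ | ⟨x, t⟩
    · rw [if_neg (by simp)]
      rw [bfsA_loop.eq_def]; rfl
    · rw [if_pos ⟨by simp, hlt⟩]
      have h0 := level_eq adj max_hops d hlt (x :: t) dists []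
      simp only [List.map_nil, List.append_nil] at h0
      rw [h0]
      exact ih (d + 1) (by omega) _ _

-- ===== VERDICT (by name: the statement is the Claim_ definition above) =====
theorem bfs_limited_spec : Claim_equal_bfs_limited := by
  intro adj start max_hops _
  unfold Spec_bfs_limited bfs_limited bfs_limited_alt
  have h := main_eq adj max_hops (max_hops - 0).toNat 0 rfl [start] (PySem.Dict.mk [(start, 0)])
  simp only [List.map_cons, List.map_nil] at h
  rw [h]
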